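-- pv_equiv track=rewrite | github.com/DancingOnAir/LeetcodePythonSolution | HashTable/2121_intervals_between_identical_elements.py | getDistances1
-- ===== SOURCE A (Python) =====
-- from typing import List
--
-- def getDistances1(arr: List[int]) -> List[int]:
--     res = [0] * len(arr)
--
--     freq = dict()
--     for i, val in enumerate(arr):
--         freq.setdefault(val, []).append(i)
--
--     for k, vs in freq.items():
--         for v in vs:
--             res[v] = sum(abs(v - x) for x in vs if x != v)
--     return res
-- ===== SOURCE B (Python) =====
-- from typing import List
--
-- def getDistances1(arr: List[int]) -> List[int]:
--     res = [0] * len(arr)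
--
--     groups = {}
--     for i, val in enumerate(arr):
--         groups.setdefault(val, []).append(i)
--
--     for vs in groups.values():
--         m = len(vs)
--         total = sum(vs)
--         left = 0
--         for k, v in enumerate(vs):
--             right = total - left - v
--             res[v] = (v * k - left) + (right - v * (m - 1 - k))
--             left += v
--     return res
-- ===== Notes on version B (the rewrite author's own statement) =====
-- stated objective: faster
-- what changed: Replaces A's per-element re-summation of the whole group (sum of abs diffs recomputed for every index) by a single left-to-right pass per group with a running prefix sum, computing each distance sum in O(1).
import Mathlib
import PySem

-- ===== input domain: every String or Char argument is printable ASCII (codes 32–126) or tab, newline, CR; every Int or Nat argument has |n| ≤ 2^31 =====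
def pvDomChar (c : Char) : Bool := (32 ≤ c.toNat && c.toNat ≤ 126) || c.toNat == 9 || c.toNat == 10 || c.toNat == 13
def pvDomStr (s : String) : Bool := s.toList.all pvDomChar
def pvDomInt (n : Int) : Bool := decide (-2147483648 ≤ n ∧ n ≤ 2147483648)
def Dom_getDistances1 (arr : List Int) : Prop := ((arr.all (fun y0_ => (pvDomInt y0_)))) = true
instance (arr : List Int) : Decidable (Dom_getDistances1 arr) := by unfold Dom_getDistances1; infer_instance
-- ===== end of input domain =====

-- B replaces A's per-group quadratic re-summation by a single left-to-right pass with a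
-- running prefix sum over each value's (increasing) index list: O(n) total vs O(n^2).

-- ===== PORT A =====
-- res[v] = ... : the index v comes from enumerate, so it is a valid non-negative index; pySetD is exact there.
def getDistances1 (arr : List Int) : List Int :=
  let res := List.replicate arr.length (0 : Int)
  let freq := (PySem.List.enumerate arr).foldl
    (fun d (p : Int × Int) => d.modify p.2 [] (· ++ [p.1])) PySem.Dict.empty
  freq.items.foldl
    (fun res kv =>
      kv.2.foldl
        (fun res v =>
          PySem.List.pySetD res v (((kv.2.filter (fun x => x ≠ v)).map (fun x => |v - x|)).sum))
        res)
    res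

-- ===== PORT B =====
def getDistances1_alt (arr : List Int) : List Int :=
  let res := List.replicate arr.length (0 : Int)
  let groups := (PySem.List.enumerate arr).foldl
    (fun d (p : Int × Int) => d.modify p.2 [] (· ++ [p.1])) PySem.Dict.empty
  groups.values.foldl
    (fun res vs =>
      let m : Int := vs.length
      let total : Int := vs.sum
      ((PySem.List.enumerate vs).foldl
        (fun (st : List Int × Int) (p : Int × Int) =>
          let k := p.1
          let v := p.2
          let left := st.2
          let right := total - left - v
          (PySem.List.pySetD st.1 v ((v * k - left) + (right - v * (m - 1 - k))), left + v))
        (res, 0)).1)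
    res

-- ===== PRECONDITION & SPEC =====
def Spec_getDistances1 (arr : List Int) (out : List Int) : Prop := out = getDistances1_alt arr
instance (arr : List Int) (out : List Int) : Decidable (Spec_getDistances1 arr out) := by unfold Spec_getDistances1; infer_instance

-- ===== CLAIM (what is proved, stated in full; the proofs are below) =====
def Claim_equal_getDistances1 : Prop := ∀ (arr : List Int), Dom_getDistances1 arr → Spec_getDistances1 arr (getDistances1 arr)

-- ===== LEMMAS AND PROOFS =====

lemma sum_abs_of_lt (v : Int) (l : List Int) (h : ∀ x ∈ l, x < v) :
    (l.map (fun x => |v - x|)).sum = l.length * v - l.sum := by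
  induction l with
  | nil => simp
  | cons a t ih =>
    have ha : a < v := h a (by simp)
    have := ih (fun x hx => h x (by simp [hx]))
    simp only [List.map_cons, List.sum_cons, List.length_cons, this]
    rw [abs_of_pos (by omega)]
    push_cast
    ring

lemma sum_abs_of_gt (v : Int) (l : List Int) (h : ∀ x ∈ l, v < x) :
    (l.map (fun x => |v - x|)).sum = l.sum - l.length * v := by
  induction l with
  | nil => simp
  | cons a t ih =>
    have ha : v < a := h a (by simp)
    have := ih (fun x hx => h x (by simp [hx]))
    simp only [List.map_cons, List.sum_cons, List.length_cons, this]
    rw [abs_of_neg (by omega)]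
    push_cast
    ring

-- the value A computes at index v = the value B computes there, given the split of the group
lemma value_eq (pre suf : List Int) (v : Int)
    (hpre : ∀ x ∈ pre, x < v) (hsuf : ∀ x ∈ suf, v < x) :
    (((pre ++ v :: suf).filter (fun x => x ≠ v)).map (fun x => |v - x|)).sum
      = (v * pre.length - pre.sum) +
        (((pre ++ v :: suf).sum - pre.sum - v)
          - v * (((pre ++ v :: suf).length : Int) - 1 - pre.length)) := by
  have h1 : pre.filter (fun x => x ≠ v) = pre := by
    apply List.filter_eq_self.mpr
    intro x hx
    have : x ≠ v := ne_of_lt (hpre x hx)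
    simpa using this
  have h2 : suf.filter (fun x => x ≠ v) = suf := by
    apply List.filter_eq_self.mpr
    intro x hx
    have : x ≠ v := ne_of_gt (hsuf x hx)
    simpa using this
  rw [List.filter_append, h1, List.filter_cons, if_neg (by simp), h2,
    List.map_append, List.sum_append, sum_abs_of_lt v pre hpre, sum_abs_of_gt v suf hsuf]
  simp only [List.sum_append, List.sum_cons, List.length_append, List.length_cons]
  push_cast
  ring

-- per-group: A's inner loop (quadratic re-summation) equals B's prefix-sum pass, for a
-- strictly increasing group vs; stated for an arbitrary split vs = pre ++ suf
lemma group_aux (vs : List Int) (hs : vs.Pairwise (· < ·)) :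
    ∀ (suf pre : List Int), vs = pre ++ suf → ∀ (res : List Int),
    suf.foldl
        (fun res v =>
          PySem.List.pySetD res v (((vs.filter (fun x => x ≠ v)).map (fun x => |v - x|)).sum))
        res
      = ((PySem.List.enumerate suf (pre.length : Int)).foldl
          (fun (st : List Int × Int) (p : Int × Int) =>
            (PySem.List.pySetD st.1 p.2
              ((p.2 * p.1 - st.2) + (((vs.sum - st.2 - p.2) - p.2 * ((vs.length : Int) - 1 - p.1)))),
             st.2 + p.2))
          (res, pre.sum)).1 := by
  intro suf
  induction suf with
  | nil => intro pre h res; simp [PySem.List.enumerate]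
  | cons v suf' ih =>
    intro pre h res
    rw [PySem.List.enumerate_cons]
    simp only [List.foldl_cons]
    have hsplit := h
    have hpre : ∀ x ∈ pre, x < v := by
      subst h
      intro x hx
      exact (List.pairwise_append.mp hs).2.2 x hx v (by simp)
    have hsuf : ∀ x ∈ suf', v < x := by
      subst hsplit
      intro x hx
      exact (List.pairwise_cons.mp (List.pairwise_append.mp hs).2.1).1 x hx
    have hval : ((vs.filter (fun x => x ≠ v)).map (fun x => |v - x|)).sum
        = (v * pre.length - pre.sum) +
          ((vs.sum - pre.sum - v) - v * ((vs.length : Int) - 1 - pre.length)) := by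
      rw [hsplit]; exact value_eq pre suf' v hpre hsuf
    rw [hval]
    have h' : vs = (pre ++ [v]) ++ suf' := by rw [hsplit]; simp
    have hstart : (((pre ++ [v]).length : Nat) : Int) = (pre.length : Int) + 1 := by simp
    have hsum : (pre ++ [v]).sum = pre.sum + v := by simp
    rw [← hstart, ← hsum]
    exact ih (pre ++ [v]) h'
      (PySem.List.pySetD res v
        ((v * pre.length - pre.sum) + ((vs.sum - pre.sum - v) - v * ((vs.length : Int) - 1 - pre.length))))

-- every index list stored in the grouping dict is strictly increasing
lemma groups_pairwise (arr : List Int) (kv : Int × List Int)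
    (h : kv ∈ ((PySem.List.enumerate arr).foldl
      (fun d (p : Int × Int) => d.modify p.2 [] (· ++ [p.1])) PySem.Dict.empty).items) :
    kv.2.Pairwise (· < ·) := by
  set freq := (PySem.List.enumerate arr).foldl
      (fun d (p : Int × Int) => d.modify p.2 [] (· ++ [p.1])) PySem.Dict.empty with hfreq
  have hnd : freq.keys.Nodup := by
    rw [hfreq]
    exact PySem.Dict.nodup_keys_foldl_modify_key (PySem.List.enumerate arr) (fun p => p.2) []
      (fun _ p => (· ++ [p.1])) PySem.Dict.empty (by simp [pysem])
  have h' : (kv.1, kv.2) ∈ freq.items := by simpa using h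
  have hget : freq.getD kv.1 [] = kv.2 := PySem.Dict.getD_of_mem_items freq h' hnd []
  have hswap : freq = ((PySem.List.enumerate arr).map Prod.swap).foldl
      (fun d (p : Int × Int) => d.modify p.1 [] (· ++ [p.2])) PySem.Dict.empty := by
    rw [hfreq, List.foldl_map]
    rfl
  have hval : freq.getD kv.1 [] =
      ((PySem.List.enumerate arr).filter (fun p => p.2 == kv.1)).map (·.1) := by
    rw [hswap, PySem.Dict.getD_foldl_modify_append]
    rw [List.filter_map, List.map_map]
    rfl
  have hpw : (((PySem.List.enumerate arr).filter (fun p => p.2 == kv.1)).map (·.1)).Pairwise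
      ((· < ·) : Int → Int → Prop) := by
    rw [List.pairwise_map]
    exact List.Pairwise.filter _ (PySem.List.pairwise_lt_enumerate arr 0)
  rw [← hget, hval]
  exact hpw

theorem getDistances1_eq (arr : List Int) : getDistances1 arr = getDistances1_alt arr := by
  unfold getDistances1 getDistances1_alt
  simp only []
  have hv : ∀ (d : PySem.Dict Int (List Int)), d.values = d.items.map (·.2) := fun _ => rfl
  rw [hv, List.foldl_map]
  apply PySem.List.foldl_congr_mem
  intro res kv hkv
  have hpw := groups_pairwise arr kv hkv
  have := group_aux kv.2 hpw kv.2 [] (by simp) res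
  simpa using this

-- ===== VERDICT (by name: the statement is the Claim_ definition above) =====
theorem getDistances1_spec : Claim_equal_getDistances1 := by
  intro arr _
  unfold Spec_getDistances1
  exact getDistances1_eq arr
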